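-- pv_equiv track=rewrite | github.com/N3LL4-01/Elyzer | core/exp_json.py | parse_key_value
-- ===== SOURCE A (Python) =====
-- def parse_key_value(text): # geändert
--     result = {}
--     current_key = None
--     current_value = None
--
--     for line in text.splitlines():
--         line = line.strip()
--
--         if ':' in line:
--             key, value = line.split(':', 1)
--             key = key.strip()
--             value = value.strip()
--
--             if current_key is not None:
--                 result[current_key] = current_value
--
--             current_key = key
--             current_value = value
--         elif current_key is not None and line:
--             current_value += ' ' + line.strip()
--
--     if current_key is not None:
--         result[current_key] = current_value
--
--     return result
-- ===== SOURCE B (Python) =====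
-- def parse_key_value(text):
--     # Walk the lines BACK-TO-FRONT. 'tail' accumulates (already ' '-prefixed)
--     # continuation text seen below; when a key line is met it absorbs tail.
--     # Duplicate keys and their order are handled by dict() itself at the end
--     # (first insertion fixes the position, last value wins).
--     entries = []
--     tail = ''
--     for raw in reversed(text.splitlines()):
--         line = raw.strip()
--         if ':' in line:
--             k, v = line.split(':', 1)
--             entries.append((k.strip(), v.strip() + tail))
--             tail = ''
--         elif line:
--             tail = ' ' + line + tail
--     entries.reverse()
--     return dict(entries)
-- ===== Notes on version B (the rewrite author's own statement) =====
-- stated objective: alternative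
-- what changed: A's forward pass with a pending current_key/current_value pair, flush-on-next-key and a final flush is replaced by a backward (reversed) traversal: a suffix accumulator collects the continuation text below the current position and is absorbed by the first key line met, producing an entry list that dict() alone turns into the last-write-wins mapping; no pending key, no deferred commit, no final flush.
import Mathlib
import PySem

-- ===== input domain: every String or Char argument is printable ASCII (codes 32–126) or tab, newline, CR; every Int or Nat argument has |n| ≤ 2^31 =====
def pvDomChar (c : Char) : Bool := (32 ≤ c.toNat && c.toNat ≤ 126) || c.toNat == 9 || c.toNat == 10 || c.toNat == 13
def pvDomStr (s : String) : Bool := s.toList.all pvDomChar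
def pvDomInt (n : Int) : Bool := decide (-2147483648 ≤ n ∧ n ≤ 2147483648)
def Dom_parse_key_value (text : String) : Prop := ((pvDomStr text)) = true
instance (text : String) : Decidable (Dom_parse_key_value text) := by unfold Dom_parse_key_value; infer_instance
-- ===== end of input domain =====

-- B replaces A's forward pass with a pending key/value pair and flush-on-next-key by a BACKWARD
-- traversal: a suffix accumulator collects continuation text from below, each key line absorbs it,
-- and dict() alone resolves duplicates; objective: alternative (same cost, no pending state).

-- ===== PORT A =====
-- A's pending-pair commit: 'if current_key is not None: result[current_key] = current_value'
def pkvFlush (st : PySem.Dict String String × Option (String × String)) : PySem.Dict String String :=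
  match st.2 with
  | some (ck, cv) => st.1.insert ck cv
  | none => st.1

-- one iteration of A's 'for line in text.splitlines()' loop
def pkvStepA (st : PySem.Dict String String × Option (String × String)) (raw : String) :
    PySem.Dict String String × Option (String × String) :=
  let line := PySem.Str.strip raw
  if PySem.Str.isIn ":" line then
    match (PySem.Str.splitMax? line ":" 1).getD [] with
    | key :: value :: _ =>
        (pkvFlush st, some (PySem.Str.strip key, PySem.Str.strip value))
    | _ => st      -- unreachable: ':' in line guarantees two pieces from split(':', 1)
  else
    match st.2 with
    | some (ck, cv) =>
        if line ≠ "" then (st.1, some (ck, cv ++ " " ++ PySem.Str.strip line)) else st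
    | none => st

def parse_key_value (text : String) : List (String × String) :=
  (pkvFlush ((PySem.Str.splitlines text).foldl pkvStepA (PySem.Dict.empty, none))).items

-- ===== PORT B =====
-- one iteration of B's 'for raw in reversed(text.splitlines())' loop:
-- a key line absorbs the suffix accumulator 'tail', a continuation line prepends itself to it
def pkvStepB (st : List (String × String) × String) (raw : String) :
    List (String × String) × String :=
  let line := PySem.Str.strip raw
  if PySem.Str.isIn ":" line then
    match (PySem.Str.splitMax? line ":" 1).getD [] with
    | k :: v :: _ => (st.1 ++ [(PySem.Str.strip k, PySem.Str.strip v ++ st.2)], "")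
    | _ => st      -- unreachable, as in A
  else if line ≠ "" then (st.1, " " ++ line ++ st.2)
  else st

def parse_key_value_alt (text : String) : List (String × String) :=
  let r := (PySem.Str.splitlines text).reverse.foldl pkvStepB ([], "")
  (PySem.Dict.ofList r.1.reverse).items

-- ===== PRECONDITION & SPEC =====
def Spec_parse_key_value (text : String) (out : List (String × String)) : Prop := out = parse_key_value_alt text
instance (text : String) (out : List (String × String)) : Decidable (Spec_parse_key_value text out) := by unfold Spec_parse_key_value; infer_instance

-- ===== CLAIM (what is proved, stated in full; the proofs are below) =====
def Claim_equal_parse_key_value : Prop := ∀ (text : String), Dom_parse_key_value text → Spec_parse_key_value text (parse_key_value text)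

-- ===== LEMMAS AND PROOFS =====

theorem pkv_dropWhile_idem (p : Char → Bool) (l : List Char) :
    List.dropWhile p (List.dropWhile p l) = List.dropWhile p l := by
  induction l with
  | nil => simp
  | cons a t ih =>
    by_cases h : p a
    · simp [h, ih]
    · simp [h]

-- stripping an already-stripped line is a no-op (A strips 'line' a second time in the elif branch)
theorem pkv_strip_idem (s : String) : PySem.Str.strip (PySem.Str.strip s) = PySem.Str.strip s := by
  have key : ∀ (t : List Char), PySem.Chars.strip (PySem.Chars.strip t) = PySem.Chars.strip t := by
    intro t
    set p := PySem.Chars.isspace with hp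
    set t' := List.dropWhile p t with ht'
    have ht'idem : List.dropWhile p t' = t' := pkv_dropWhile_idem p t
    set u := (List.dropWhile p t'.reverse).reverse with hu
    have hurev : u.reverse = List.dropWhile p t'.reverse := by simp [hu]
    have hpref : u <+: t' := by
      have h1 : u.reverse <:+ t'.reverse := hurev ▸ List.dropWhile_suffix p
      simpa using h1.reverse
    have hl : List.dropWhile p u = u := by
      cases hc : u with
      | nil => simp
      | cons a v =>
        have ha : ¬ p a = true := by
          obtain ⟨rest, hrest⟩ := hpref
          rw [hc] at hrest
          intro hpa
          have := ht'idem
          rw [← hrest] at this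
          simp [hpa] at this
          have hlen := congrArg List.length this
          have hle := List.length_dropWhile_le p (v ++ rest)
          simp at hlen hle
          omega
        simp [ha]
    have hr : (List.dropWhile p u.reverse).reverse = u := by
      rw [hurev, pkv_dropWhile_idem, ← hurev, List.reverse_reverse]
    show (List.dropWhile p (List.dropWhile p u).reverse).reverse = u
    rw [hl, hr]
  simp only [PySem.Str.strip]
  rw [String.toList_ofList, key]

-- the proof-side cons-shaped form of B's reversed loop: foldr over the FORWARD line list
def pkvStepR (raw : String) (st : List (String × String) × String) :
    List (String × String) × String :=
  let line := PySem.Str.strip raw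
  if PySem.Str.isIn ":" line then
    match (PySem.Str.splitMax? line ":" 1).getD [] with
    | k :: v :: _ => ((PySem.Str.strip k, PySem.Str.strip v ++ st.2) :: st.1, "")
    | _ => st
  else if line ≠ "" then (st.1, " " ++ line ++ st.2)
  else st

-- B's foldl over the reversed list, with snoc, is the foldr with cons (entries reversed)
theorem pkv_foldl_rev_eq_foldr (lines : List String) : ∀ (es : List (String × String)) (t : String),
    lines.reverse.foldl pkvStepB (es, t) =
      (es ++ (lines.foldr pkvStepR ([], t)).1.reverse, (lines.foldr pkvStepR ([], t)).2) := by
  induction lines with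
  | nil => intro es t; simp
  | cons raw rest ih =>
    intro es t
    rw [List.reverse_cons, List.foldl_append, List.foldl_cons, List.foldl_nil, List.foldr_cons]
    rw [ih es t]
    set st := rest.foldr pkvStepR ([], t) with hst
    by_cases hin : PySem.Str.isIn ":" (PySem.Str.strip raw) = true
    all_goals simp at hin
    · cases hsplit : (PySem.Str.splitMax? (PySem.Str.strip raw) ":" 1).getD [] with
      | nil =>
        have hB : ∀ s : List (String × String) × String, pkvStepB s raw = s := by
          intro s; simp [pkvStepB, hin, hsplit]
        have hR : pkvStepR raw st = st := by simp [pkvStepR, hin, hsplit]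
        rw [hB, hR]
      | cons k restp =>
        cases restp with
        | nil =>
          have hB : ∀ s : List (String × String) × String, pkvStepB s raw = s := by
            intro s; simp [pkvStepB, hin, hsplit]
          have hR : pkvStepR raw st = st := by simp [pkvStepR, hin, hsplit]
          rw [hB, hR]
        | cons v tl =>
          have hB : ∀ s : List (String × String) × String, pkvStepB s raw
              = (s.1 ++ [(PySem.Str.strip k, PySem.Str.strip v ++ s.2)], "") := by
            intro s; simp [pkvStepB, hin, hsplit]
          have hR : pkvStepR raw st
              = ((PySem.Str.strip k, PySem.Str.strip v ++ st.2) :: st.1, "") := by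
            simp [pkvStepR, hin, hsplit]
          rw [hB, hR]
          simp
    · by_cases hemp : PySem.Str.strip raw = ""
      · have hB : ∀ s : List (String × String) × String, pkvStepB s raw = s := by
          intro s; simp [pkvStepB, hemp]
          intro h; exact absurd h (by decide)
        have hR : pkvStepR raw st = st := by
          simp [pkvStepR, hemp]
          intro h; exact absurd h (by decide)
        rw [hB, hR]
      · have hB : ∀ s : List (String × String) × String, pkvStepB s raw
            = (s.1, " " ++ PySem.Str.strip raw ++ s.2) := by
          intro s; simp [pkvStepB, hin, hemp]
        have hR : pkvStepR raw st = (st.1, " " ++ PySem.Str.strip raw ++ st.2) := by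
          simp [pkvStepR, hin, hemp]
        rw [hB, hR]

-- A's state after the remaining lines, committed: dict d, pending pair, then the entries of the
-- suffix inserted in order (the pending value first absorbing the suffix's leading continuation tail)
def pkvCommit (d : PySem.Dict String String) (pend : Option (String × String))
    (es : List (String × String)) (tail : String) : PySem.Dict String String :=
  es.foldl (fun d e => d.insert e.1 e.2)
    (match pend with
     | some (k, v) => d.insert k (v ++ tail)
     | none => d)

-- the main invariant: A's forward fold, flushed, equals pkvCommit of B's foldr result
theorem pkv_main (lines : List String) : ∀ (d : PySem.Dict String String)
    (pend : Option (String × String)),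
    pkvFlush (lines.foldl pkvStepA (d, pend)) =
      pkvCommit d pend (lines.foldr pkvStepR ([], "")).1 (lines.foldr pkvStepR ([], "")).2 := by
  induction lines with
  | nil =>
    intro d pend
    cases pend with
    | none => rfl
    | some kv => simp [pkvFlush, pkvCommit]
  | cons raw rest ih =>
    intro d pend
    rw [List.foldl_cons, List.foldr_cons]
    set st := rest.foldr pkvStepR ([], "") with hst
    by_cases hin : PySem.Str.isIn ":" (PySem.Str.strip raw) = true
    all_goals simp at hin
    · cases hsplit : (PySem.Str.splitMax? (PySem.Str.strip raw) ":" 1).getD [] with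
      | nil =>
        have hA : pkvStepA (d, pend) raw = (d, pend) := by simp [pkvStepA, hin, hsplit]
        have hR : pkvStepR raw st = st := by simp [pkvStepR, hin, hsplit]
        rw [hA, hR]; exact ih d pend
      | cons k restp =>
        cases restp with
        | nil =>
          have hA : pkvStepA (d, pend) raw = (d, pend) := by simp [pkvStepA, hin, hsplit]
          have hR : pkvStepR raw st = st := by simp [pkvStepR, hin, hsplit]
          rw [hA, hR]; exact ih d pend
        | cons v tl =>
          have hA : pkvStepA (d, pend) raw
              = (pkvFlush (d, pend), some (PySem.Str.strip k, PySem.Str.strip v)) := by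
            simp [pkvStepA, hin, hsplit]
          have hR : pkvStepR raw st
              = ((PySem.Str.strip k, PySem.Str.strip v ++ st.2) :: st.1, "") := by
            simp [pkvStepR, hin, hsplit]
          rw [hA, hR, ih (pkvFlush (d, pend)) (some (PySem.Str.strip k, PySem.Str.strip v))]
          cases pend with
          | none => rfl
          | some kv =>
            obtain ⟨ck, cv⟩ := kv
            simp [pkvCommit, pkvFlush]
    · by_cases hemp : PySem.Str.strip raw = ""
      · have hA : pkvStepA (d, pend) raw = (d, pend) := by
          cases pend with
          | none => simp [pkvStepA, hin]
          | some kv =>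
            obtain ⟨ck, cv⟩ := kv
            simp [pkvStepA, hemp]
            intro h; exact absurd h (by decide)
        have hR : pkvStepR raw st = st := by
          simp [pkvStepR, hemp]
          intro h; exact absurd h (by decide)
        rw [hA, hR]; exact ih d pend
      · have hR : pkvStepR raw st = (st.1, " " ++ PySem.Str.strip raw ++ st.2) := by
          simp [pkvStepR, hin, hemp]
        rw [hR]
        cases pend with
        | none =>
          have hA : pkvStepA (d, none) raw = (d, none) := by simp [pkvStepA, hin]
          rw [hA, ih d none]; rfl
        | some kv =>
          obtain ⟨ck, cv⟩ := kv
          have hA : pkvStepA (d, some (ck, cv)) raw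
              = (d, some (ck, cv ++ " " ++ PySem.Str.strip raw)) := by
            simp [pkvStepA, hin, hemp, pkv_strip_idem]
          rw [hA, ih d (some (ck, cv ++ " " ++ PySem.Str.strip raw))]
          have hs : cv ++ " " ++ PySem.Str.strip raw ++ st.2
              = cv ++ (" " ++ PySem.Str.strip raw ++ st.2) := by
            apply String.ext; simp
          simp only [pkvCommit, hs]

-- inserting a pair list into the empty dict in order is Dict.ofList
theorem pkv_foldl_insert_eq_ofList (es : List (String × String)) :
    es.foldl (fun d (e : String × String) => d.insert e.1 e.2) PySem.Dict.empty
      = PySem.Dict.ofList es := by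
  simp [PySem.Dict.ofList, PySem.Dict.empty, PySem.Dict.update]

-- ===== VERDICT (by name: the statement is the Claim_ definition above) =====
theorem parse_key_value_spec : Claim_equal_parse_key_value := by
  intro text _
  simp only [Spec_parse_key_value, parse_key_value, parse_key_value_alt]
  rw [pkv_foldl_rev_eq_foldr (PySem.Str.splitlines text) [] ""]
  simp only [List.nil_append, List.reverse_reverse]
  rw [pkv_main (PySem.Str.splitlines text) PySem.Dict.empty none]
  simp only [pkvCommit]
  rw [pkv_foldl_insert_eq_ofList]
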